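-- pv_equiv track=rewrite | github.com/shashank231/imp-my-prep | Graphs/basics3.py | get_probable_solution
-- ===== SOURCE A (Python) =====
-- def get_probable_solution(nodes, colors):
--     colors_dict = dict()
--     for node in nodes:
--         colour_of_node = colors[node]
--         colors_dict[colour_of_node] = colors_dict.setdefault(colour_of_node, 0) + 1
--     max_times = 0
--     for k, v in colors_dict.items():
--         max_times = max(max_times, v)
--     return max_times
-- ===== SOURCE B (Python) =====
-- def get_probable_solution(nodes, colors):
--     vals = sorted(colors[node] for node in nodes)
--     if not vals:
--         return 0
--     best = run = 1
--     prev = vals[0]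
--     for v in vals[1:]:
--         if v == prev:
--             run += 1
--         else:
--             run = 1
--             prev = v
--         best = max(best, run)
--     return best
-- ===== Notes on version B (the rewrite author's own statement) =====
-- stated objective: alternative
-- what changed: Replaces the incrementally maintained frequency dict (setdefault/overwrite per node, then a max pass over its items) with a sort of the looked-up colors followed by one linear scan that tracks the length of the current run of equal elements and the best run seen; the mode's frequency is the longest run of the sorted list.
import Mathlib
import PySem

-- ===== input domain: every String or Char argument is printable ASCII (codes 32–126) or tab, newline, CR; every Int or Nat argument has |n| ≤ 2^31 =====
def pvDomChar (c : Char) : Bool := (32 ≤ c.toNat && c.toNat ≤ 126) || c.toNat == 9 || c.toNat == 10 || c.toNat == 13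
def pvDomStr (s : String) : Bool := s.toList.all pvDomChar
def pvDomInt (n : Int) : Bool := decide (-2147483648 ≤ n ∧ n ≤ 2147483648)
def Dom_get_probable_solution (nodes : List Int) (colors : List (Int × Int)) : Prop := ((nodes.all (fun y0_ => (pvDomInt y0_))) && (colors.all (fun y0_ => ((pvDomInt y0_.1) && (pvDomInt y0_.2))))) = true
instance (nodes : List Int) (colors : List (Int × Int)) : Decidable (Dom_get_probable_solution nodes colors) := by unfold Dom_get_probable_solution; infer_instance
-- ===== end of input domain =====

-- B keeps no frequency table at all: it sorts the looked-up colors and finds the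
-- longest run of equal consecutive elements in one linear scan (the mode's frequency).

-- colors[node]: dict lookup (first match). The default 0 is never used inside
-- Pre_ (which requires every node to be a key); outside Pre_ Python raises KeyError.
def pvColorAt (colors : List (Int × Int)) (node : Int) : Int :=
  (PySem.Dict.mk colors).getD node 0

-- ===== PORT A =====
def get_probable_solution (nodes : List Int) (colors : List (Int × Int)) : Int :=
  let colors_dict := nodes.foldl
    (fun d node =>
      let c := pvColorAt colors node
      -- colors_dict[c] = colors_dict.setdefault(c, 0) + 1
      (d.setdefault c 0).insert c (((d.get? c).getD 0) + 1))
    PySem.Dict.empty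
  colors_dict.items.foldl (fun max_times kv => max max_times kv.2) 0

-- ===== PORT B =====
-- the 'for v in vals[1:]' loop: state (prev, run, best)
def pvScan (prev run best : Int) : List Int → Int
  | [] => best
  | v :: rest =>
      if v = prev then pvScan prev (run + 1) (max best (run + 1)) rest
      else pvScan v 1 (max best 1) rest

def get_probable_solution_alt (nodes : List Int) (colors : List (Int × Int)) : Int :=
  let vals := PySem.List.sorted (nodes.map (pvColorAt colors)) (fun x => x) false
  match vals with
  | [] => 0
  | h :: t => pvScan h 1 1 t

-- ===== PRECONDITION & SPEC =====
-- Pre_ excludes exactly the inputs where Python A raises KeyError: some node is not a key of colors.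
def Pre_get_probable_solution (nodes : List Int) (colors : List (Int × Int)) : Prop :=
  ∀ n ∈ nodes, (PySem.Dict.mk colors).contains n = true
instance (nodes : List Int) (colors : List (Int × Int)) : Decidable (Pre_get_probable_solution nodes colors) := by unfold Pre_get_probable_solution; infer_instance

def pvWitness_get_probable_solution : List Int × (List (Int × Int)) :=
  ([0, 1, 1, 2], [(0, 5), (1, 7), (2, 5)])

def Spec_get_probable_solution (nodes : List Int) (colors : List (Int × Int)) (out : Int) : Prop := out = get_probable_solution_alt nodes colors
instance (nodes : List Int) (colors : List (Int × Int)) (out : Int) : Decidable (Spec_get_probable_solution nodes colors out) := by unfold Spec_get_probable_solution; infer_instance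

-- ===== CLAIM (what is proved, stated in full; the proofs are below) =====
def Claim_equal_get_probable_solution : Prop := ∀ (nodes : List Int) (colors : List (Int × Int)), Dom_get_probable_solution nodes colors → Pre_get_probable_solution nodes colors → Spec_get_probable_solution nodes colors (get_probable_solution nodes colors)

-- ===== LEMMAS AND PROOFS =====

-- fold max with initial 0, the shape both sides reduce to
def pvFm (l : List Int) : Int := l.foldl max 0

theorem pv_foldl_max_eq (l : List Int) (a b : Int) :
    l.foldl max (max a b) = max a (l.foldl max b) := by
  induction l generalizing a b with
  | nil => simp
  | cons x l ih =>
    simp only [List.foldl]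
    rw [show max (max a b) x = max a (max b x) by omega, ih]

theorem pvFm_cons (x : Int) (l : List Int) : pvFm (x :: l) = max x (pvFm l) := by
  simp only [pvFm, List.foldl]
  rw [show max 0 x = max x 0 by omega, pv_foldl_max_eq]

theorem pvFm_nonneg (l : List Int) : 0 ≤ pvFm l := by
  induction l with
  | nil => simp [pvFm]
  | cons x l ih => rw [pvFm_cons]; omega

theorem pvFm_le_of_mem {x : Int} {l : List Int} (h : x ∈ l) : x ≤ pvFm l := by
  induction l with
  | nil => simp at h
  | cons y l ih =>
    rw [pvFm_cons]
    rcases List.mem_cons.mp h with h | h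
    · omega
    · have := ih h; omega

theorem pvFm_le {l : List Int} {b : Int} (hb : 0 ≤ b) (h : ∀ x ∈ l, x ≤ b) : pvFm l ≤ b := by
  induction l with
  | nil => simpa [pvFm]
  | cons y l ih =>
    rw [pvFm_cons]
    have h1 := h y (by simp)
    have h2 := ih (fun x hx => h x (by simp [hx]))
    omega

-- pvFm of mapped values only depends on the set of list members
theorem pvFm_map_eq_of_mem_iff (f : Int → Int) (l1 l2 : List Int)
    (h : ∀ x, x ∈ l1 ↔ x ∈ l2) : pvFm (l1.map f) = pvFm (l2.map f) := by
  have le : ∀ (a b : List Int), (∀ x, x ∈ a ↔ x ∈ b) → pvFm (a.map f) ≤ pvFm (b.map f) := by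
    intro a b hab
    apply pvFm_le (pvFm_nonneg _)
    intro x hx
    rcases List.mem_map.mp hx with ⟨y, hy, rfl⟩
    exact pvFm_le_of_mem (List.mem_map.mpr ⟨y, (hab y).mp hy, rfl⟩)
  exact le_antisymm (le l1 l2 h) (le l2 l1 (fun x => (h x).symm))

-- max frequency, expressed as a fold over the list itself (one entry per position)
def pvMaxCount (s : List Int) : Int := pvFm (s.map (fun c => (s.count c : Int)))

-- generalized absorption: entries equal to v map to k, which the outer max k absorbs
theorem pv_absorb (v k : Int) (f g : Int → Int) (l : List Int)
    (hv : ∀ w ∈ l, w = v → f w = k) (hg : ∀ w ∈ l, w ≠ v → f w = g w) :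
    max k (pvFm (l.map f)) = max k (pvFm ((l.filter (fun w => w ≠ v)).map g)) := by
  induction l with
  | nil => simp
  | cons w l ih =>
    have ih' := ih (fun w hw => hv w (by simp [hw])) (fun w hw => hg w (by simp [hw]))
    by_cases hwv : w = v
    · rw [List.map_cons, pvFm_cons, hv w (by simp) hwv]
      have hfil : List.filter (fun w => decide (w ≠ v)) (w :: l)
          = List.filter (fun w => decide (w ≠ v)) l := by
        simp [hwv]
      rw [show (fun (w : Int) => decide (w ≠ v)) = (fun (w : Int) => (w ≠ v : Bool)) from rfl] at hfil
      rw [hfil]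
      omega
    · rw [List.map_cons, pvFm_cons, hg w (by simp) hwv]
      have hfil : List.filter (fun w => decide (w ≠ v)) (w :: l)
          = w :: List.filter (fun w => decide (w ≠ v)) l := by
        simp [hwv]
      rw [show (fun (w : Int) => decide (w ≠ v)) = (fun (w : Int) => (w ≠ v : Bool)) from rfl] at hfil
      rw [hfil, List.map_cons, pvFm_cons]
      omega

theorem pv_count_filter_ne (s : List Int) (v w : Int) (h : w ≠ v) :
    (s.filter (fun x => x ≠ v)).count w = s.count w := by
  exact List.count_filter (by simp [h])

-- peeling the head off pvMaxCount (no order assumption needed)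
theorem pvMaxCount_cons (v : Int) (s : List Int) :
    pvMaxCount (v :: s) = max (1 + (s.count v : Int)) (pvMaxCount (s.filter (fun w => w ≠ v))) := by
  have hk : (((v :: s).count v : Int)) = 1 + (s.count v : Int) := by
    simp
    omega
  have habs := pv_absorb v (1 + (s.count v : Int))
      (fun c => (((v :: s).count c : Int)))
      (fun c => (((s.filter (fun w => w ≠ v)).count c : Int))) s
      (by intro w _ hw
          show (((v :: s).count w : Int)) = 1 + (s.count v : Int)
          subst hw; exact hk)
      (by intro w _ hw
          show (((v :: s).count w : Int)) = (((s.filter (fun x => x ≠ v)).count w : Int))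
          rw [pv_count_filter_ne s v w hw]
          rw [List.count_cons, if_neg (by simp [Ne.symm hw])]
          simp)
  simp only [pvMaxCount, List.map_cons, pvFm_cons, hk]
  rw [habs]

-- best only accumulates the max; the running 'g' below computes the pure part
def pvG (prev run : Int) : List Int → Int
  | [] => run
  | v :: rest => if v = prev then pvG prev (run + 1) rest else max run (pvG v 1 rest)

theorem pvG_ge (prev run : Int) (s : List Int) : run ≤ pvG prev run s := by
  induction s generalizing prev run with
  | nil => simp [pvG]
  | cons v s ih =>
    simp only [pvG]
    split
    · have := ih prev (run + 1); omega
    · have := ih v 1; omega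

theorem pvScan_eq_pvG (s : List Int) (prev run best : Int) (h : run ≤ best) :
    pvScan prev run best s = max best (pvG prev run s) := by
  induction s generalizing prev run best with
  | nil => simp only [pvScan, pvG]; omega
  | cons v s ih =>
    simp only [pvScan, pvG]
    split
    · rw [ih prev (run + 1) (max best (run + 1)) (by omega)]
      have := pvG_ge prev (run + 1) s
      omega
    · rw [ih v 1 (max best 1) (by omega)]
      have := pvG_ge v 1 s
      omega

-- on a sorted tail, pvG computes the max run length = max count
theorem pvG_sorted (s : List Int) (prev run : Int) (hrun : 1 ≤ run)
    (hs : (prev :: s).Pairwise (· ≤ ·)) :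
    pvG prev run s = max (run + s.count prev) (pvMaxCount (s.filter (fun w => w ≠ prev))) := by
  induction s generalizing prev run with
  | nil =>
    have h0 : pvMaxCount (List.filter (fun w => w ≠ prev) []) = 0 := rfl
    simp only [pvG, List.count_nil]
    rw [h0]; omega
  | cons v s ih =>
    rcases List.pairwise_cons.mp hs with ⟨hle, hvs⟩
    by_cases hv : v = prev
    · subst hv
      have hs' : (v :: s).Pairwise (· ≤ ·) := by
        refine List.pairwise_cons.mpr
          ⟨fun w hw => hle w (by simp [hw]), (List.pairwise_cons.mp hvs).2⟩
      simp only [pvG]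
      rw [if_pos trivial, ih v (run + 1) (by omega) hs']
      have hfil : List.filter (fun w => decide (w ≠ v)) (v :: s)
          = List.filter (fun w => decide (w ≠ v)) s := by
        simp
      rw [show (fun (w : Int) => decide (w ≠ v)) = (fun (w : Int) => (w ≠ v : Bool)) from rfl] at hfil
      rw [hfil]
      have hc : (((v :: s).count v : Int)) = 1 + (s.count v : Int) := by
        simp
        omega
      rw [hc]
      omega
    · have hpv : prev < v := lt_of_le_of_ne (hle v (by simp)) (fun h => hv h.symm)
      have hnotin : ∀ w ∈ v :: s, w ≠ prev := by
        intro w hw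
        rcases List.mem_cons.mp hw with rfl | hw
        · omega
        · have := (List.pairwise_cons.mp hvs).1 w hw
          omega
      have hcount : (v :: s).count prev = 0 := by
        rw [List.count_eq_zero]
        intro hmem
        exact hnotin prev hmem rfl
      have hfilter : (v :: s).filter (fun w => w ≠ prev) = v :: s := by
        rw [List.filter_eq_self]
        intro w hw
        simpa using hnotin w hw
      simp only [pvG, if_neg hv]
      rw [ih v 1 le_rfl hvs, hcount, hfilter, pvMaxCount_cons]
      have : (0:Int) ≤ (s.count v : Int) := by positivity
      omega

-- A's loop body 'd[c] = d.setdefault(c, 0) + 1' is one counter insert.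
theorem pv_step_eq (d : PySem.Dict Int Int) (c : Int) :
    (d.setdefault c 0).insert c (((d.get? c).getD 0) + 1)
      = d.insert c (d.getD c 0 + 1) := by
  rw [PySem.Dict.getD_eq_get?_getD]
  by_cases h : d.contains c = true
  · rw [PySem.Dict.setdefault_of_contains (h := h)]
  · rw [PySem.Dict.setdefault_of_not_contains (h := by simpa using h),
        PySem.Dict.insert_insert_self]

-- A's dict is Counter(vals).
theorem pv_dict_eq_counter (nodes : List Int) (colors : List (Int × Int)) :
    nodes.foldl
      (fun d node =>
        let c := pvColorAt colors node
        (d.setdefault c 0).insert c (((d.get? c).getD 0) + 1))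
      PySem.Dict.empty
      = PySem.Dict.counter (nodes.map (pvColorAt colors)) := by
  rw [← PySem.Dict.foldl_insert_getD_add_one_eq_counter, List.foldl_map]
  apply PySem.List.foldl_congr_mem
  intro d n _
  exact pv_step_eq d (pvColorAt colors n)

-- A's value is pvMaxCount of the looked-up color list.
theorem pvA_eq_maxCount (nodes : List Int) (colors : List (Int × Int)) :
    get_probable_solution nodes colors = pvMaxCount (nodes.map (pvColorAt colors)) := by
  simp only [get_probable_solution]
  rw [pv_dict_eq_counter, PySem.Dict.items_counter, List.foldl_map]
  set vals := nodes.map (pvColorAt colors) with hv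
  have h1 : (PySem.Set.ofList vals).foldl
      (fun m c => max m ((vals.count c : Int))) 0
      = pvFm ((PySem.Set.ofList vals).map (fun c => (vals.count c : Int))) := by
    rw [pvFm, List.foldl_map]
  rw [h1, pvMaxCount]
  apply pvFm_map_eq_of_mem_iff
  intro x
  rw [← PySem.List.dedup_eq_ofList, PySem.List.mem_dedup]

-- B's value is pvMaxCount of the same list (sortedness + run scan).
theorem pvB_eq_maxCount (nodes : List Int) (colors : List (Int × Int)) :
    get_probable_solution_alt nodes colors = pvMaxCount (nodes.map (pvColorAt colors)) := by
  simp only [get_probable_solution_alt]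
  have hperm : (PySem.List.sorted (nodes.map (pvColorAt colors)) (fun x => x) false).Perm
      (nodes.map (pvColorAt colors)) := PySem.List.sorted_perm _ _ _
  have hpw : (PySem.List.sorted (nodes.map (pvColorAt colors)) (fun x => x) false).Pairwise
      (· ≤ ·) := by
    have := PySem.List.sorted_pairwise (xs := nodes.map (pvColorAt colors))
      (key := fun x : Int => x)
    simpa using this
  have hmc : pvMaxCount (PySem.List.sorted (nodes.map (pvColorAt colors)) (fun x => x) false)
      = pvMaxCount (nodes.map (pvColorAt colors)) := by
    unfold pvMaxCount
    calc pvFm ((PySem.List.sorted (nodes.map (pvColorAt colors)) (fun x => x) false).map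
            fun c => (((PySem.List.sorted (nodes.map (pvColorAt colors)) (fun x => x) false).count c : Int)))
        = pvFm ((PySem.List.sorted (nodes.map (pvColorAt colors)) (fun x => x) false).map
            fun c => (((nodes.map (pvColorAt colors)).count c : Int))) := by
          congr 1
          exact List.map_congr_left (fun c _ => by exact_mod_cast hperm.count_eq c)
      _ = pvFm ((nodes.map (pvColorAt colors)).map
            fun c => (((nodes.map (pvColorAt colors)).count c : Int))) :=
          pvFm_map_eq_of_mem_iff _ _ _ (fun x => hperm.mem_iff)
  cases hsort : PySem.List.sorted (nodes.map (pvColorAt colors)) (fun x => x) false with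
  | nil =>
    rw [hsort] at hmc
    rw [← hmc]
    rfl
  | cons h t =>
    rw [hsort] at hpw hmc
    rw [← hmc]
    show pvScan h 1 1 t = pvMaxCount (h :: t)
    have h1 : pvScan h 1 1 t = max 1 (pvG h 1 t) := pvScan_eq_pvG t h 1 1 le_rfl
    have h2 : pvG h 1 t = max (1 + (t.count h : Int)) (pvMaxCount (t.filter (fun w => w ≠ h))) :=
      pvG_sorted t h 1 le_rfl hpw
    have h3 := pvMaxCount_cons h t
    have hc : (0:Int) ≤ (t.count h : Int) := by positivity
    simp only [h1, h2, h3]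
    omega

-- ===== VERDICT (by name: the statement is the Claim_ definition above) =====
theorem get_probable_solution_spec : Claim_equal_get_probable_solution := by
  intro nodes colors _ _
  rw [Spec_get_probable_solution, pvA_eq_maxCount, pvB_eq_maxCount]
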